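-- pv_equiv track=rewrite | github.com/petpetpeter/pybullet_softbody | remove2dmesh.py | removeLine
-- ===== SOURCE A (Python) =====
-- def removeLine(fileList):
--     removeCellList = []
--     twoDCellList = []
--     resultCellList = []
--     twoDMeshList = []
--     ####remove2Dcell########
--     for line in fileList:
--         if len(line) > 0:
--             if len(line) != 4 or line[0] != '3':
--                 removeCellList.append(line)
--             else:
--                 twoDCellList.append(line)
--         else:
--             removeCellList.append(line)
--     ###remove2Dmesh########
--     for line in removeCellList:
--         if len(line) > 0:
--             if len(line) != 1 or line[0] != '5':
--                 resultCellList.append(line)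
--             else:
--                 twoDMeshList.append(line)
--         else:
--             resultCellList.append(line)
--
--     return resultCellList,len(twoDCellList),len(twoDMeshList)
-- ===== SOURCE B (Python) =====
-- def removeLine(fileList):
--     # One pass, three-way branch; counts 2D cells / meshes directly instead of
--     # collecting them in intermediate lists.
--     resultCellList = []
--     num2dCells = 0
--     num2dMeshes = 0
--     for line in fileList:
--         if len(line) == 4 and line[0] == '3':
--             num2dCells += 1
--         elif len(line) == 1 and line[0] == '5':
--             num2dMeshes += 1
--         else:
--             resultCellList.append(line)
--     return resultCellList, num2dCells, num2dMeshes
-- ===== Notes on version B (the rewrite author's own statement) =====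
-- stated objective: simpler
-- what changed: Replaces A's two sequential filtering passes with intermediate removeCellList/twoDCellList/twoDMeshList lists by a single pass with a three-way branch that keeps only the result list and two integer counters.
import Mathlib
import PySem

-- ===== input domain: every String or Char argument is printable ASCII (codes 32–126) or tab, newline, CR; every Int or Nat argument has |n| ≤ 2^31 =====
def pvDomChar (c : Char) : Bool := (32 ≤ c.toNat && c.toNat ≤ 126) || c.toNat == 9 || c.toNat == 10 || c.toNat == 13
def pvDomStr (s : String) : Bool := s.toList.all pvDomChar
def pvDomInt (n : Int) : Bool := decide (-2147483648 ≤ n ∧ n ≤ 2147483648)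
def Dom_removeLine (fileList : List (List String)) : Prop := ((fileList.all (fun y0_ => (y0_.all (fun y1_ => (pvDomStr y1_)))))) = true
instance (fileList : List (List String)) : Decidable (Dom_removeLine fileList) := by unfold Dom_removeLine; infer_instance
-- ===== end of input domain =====

-- B replaces A's two sequential filtering passes (with intermediate lists) by a
-- single pass with a three-way branch and two integer counters; same return value.


-- ===== PORT A =====
-- first loop: builds (removeCellList, twoDCellList); line[0] is only read after len(line) > 0
def removeLineA1 : List (List String) → List (List String) × List (List String)
  | [] => ([], [])
  | line :: rest =>
    let (r, t) := removeLineA1 rest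
    if line.length > 0 then
      if line.length ≠ 4 ∨ line.headD "" ≠ "3" then (line :: r, t) else (r, line :: t)
    else (line :: r, t)

-- second loop over removeCellList: builds (resultCellList, twoDMeshList)
def removeLineA2 : List (List String) → List (List String) × List (List String)
  | [] => ([], [])
  | line :: rest =>
    let (r, t) := removeLineA2 rest
    if line.length > 0 then
      if line.length ≠ 1 ∨ line.headD "" ≠ "5" then (line :: r, t) else (r, line :: t)
    else (line :: r, t)

def removeLine (fileList : List (List String)) : List (List String) × Int × Int :=
  let (removeCellList, twoDCellList) := removeLineA1 fileList
  let (resultCellList, twoDMeshList) := removeLineA2 removeCellList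
  (resultCellList, (twoDCellList.length : Int), (twoDMeshList.length : Int))

-- ===== PORT B =====
-- single pass, three-way branch, two counters
def removeLine_alt : List (List String) → List (List String) × Int × Int
  | [] => ([], 0, 0)
  | line :: rest =>
    let (r, c, m) := removeLine_alt rest
    if line.length = 4 ∧ line.headD "" = "3" then (r, c + 1, m)
    else if line.length = 1 ∧ line.headD "" = "5" then (r, c, m + 1)
    else (line :: r, c, m)

-- ===== PRECONDITION & SPEC =====
def Spec_removeLine (fileList : List (List String)) (out : List (List String) × Int × Int) : Prop := out = removeLine_alt fileList
instance (fileList : List (List String)) (out : List (List String) × Int × Int) : Decidable (Spec_removeLine fileList out) := by unfold Spec_removeLine; infer_instance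

-- ===== CLAIM (what is proved, stated in full; the proofs are below) =====
def Claim_equal_removeLine : Prop := ∀ (fileList : List (List String)), Dom_removeLine fileList → Spec_removeLine fileList (removeLine fileList)

-- ===== LEMMAS AND PROOFS =====
theorem removeLineA1_cons (line : List String) (rest : List (List String)) :
    removeLineA1 (line :: rest) =
      if line.length = 4 ∧ line.headD "" = "3" then
        ((removeLineA1 rest).1, line :: (removeLineA1 rest).2)
      else (line :: (removeLineA1 rest).1, (removeLineA1 rest).2) := by
  by_cases h : line.length = 4 ∧ line.headD "" = "3"
  · rw [if_pos h]
    simp only [removeLineA1]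
    rw [if_pos (by omega), if_neg (by tauto)]
  · rw [if_neg h]
    simp only [removeLineA1]
    by_cases hp : line.length > 0
    · rw [if_pos hp, if_pos (by tauto)]
    · rw [if_neg hp]

theorem removeLineA2_cons (line : List String) (rest : List (List String)) :
    removeLineA2 (line :: rest) =
      if line.length = 1 ∧ line.headD "" = "5" then
        ((removeLineA2 rest).1, line :: (removeLineA2 rest).2)
      else (line :: (removeLineA2 rest).1, (removeLineA2 rest).2) := by
  by_cases h : line.length = 1 ∧ line.headD "" = "5"
  · rw [if_pos h]
    simp only [removeLineA2]
    rw [if_pos (by omega), if_neg (by tauto)]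
  · rw [if_neg h]
    simp only [removeLineA2]
    by_cases hp : line.length > 0
    · rw [if_pos hp, if_pos (by tauto)]
    · rw [if_neg hp]

theorem removeLine_unfold (fileList : List (List String)) :
    removeLine fileList =
      ((removeLineA2 (removeLineA1 fileList).1).1,
       ((removeLineA1 fileList).2.length : Int),
       ((removeLineA2 (removeLineA1 fileList).1).2.length : Int)) := rfl

theorem removeLine_eq_alt (fileList : List (List String)) :
    removeLine fileList = removeLine_alt fileList := by
  induction fileList with
  | nil => rfl
  | cons line rest ih =>
    rw [removeLine_unfold] at ih ⊢
    rw [removeLineA1_cons]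
    by_cases h3 : line.length = 4 ∧ line.headD "" = "3"
    · rw [if_pos h3]
      simp only [removeLine_alt, if_pos h3, ← ih, List.length_cons]
      push_cast
      ring_nf
    · rw [if_neg h3]
      simp only [removeLineA2_cons]
      by_cases h5 : line.length = 1 ∧ line.headD "" = "5"
      · rw [if_pos h5]
        simp only [removeLine_alt, if_neg h3, if_pos h5, ← ih, List.length_cons]
        push_cast
        ring_nf
      · rw [if_neg h5]
        simp only [removeLine_alt, if_neg h3, if_neg h5, ← ih]

-- ===== VERDICT (by name: the statement is the Claim_ definition above) =====
theorem removeLine_spec : Claim_equal_removeLine := by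
  intro fileList _
  exact removeLine_eq_alt fileList
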